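-- pv_equiv track=rewrite | github.com/kye01018327/cs454-cybersecurity | hw2/utils.py | convert_block_to_int
-- ===== SOURCE A (Python) =====
-- def convert_block_to_int(block: list[list[int]]) -> int:
--     total_bytes = 16
--     output_int = 0
--     for i in range(4):
--         for j in range(4):
--             byte = block[i][j]
--             byte_index = total_bytes - 1 - (i * 4 + j)
--             shift_amount = byte_index * 8
--             output_int |= (byte << shift_amount)
--     return output_int
-- ===== SOURCE B (Python) =====
-- def convert_block_to_int(block: list[list[int]]) -> int:
--     # Pairwise tree reduction: 16 bytes -> 8 halfwords -> 4 words -> 2 qwords -> 1 int.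
--     # Correct because << distributes over | and | is associative, so the tree of
--     # (hi << width) | lo merges equals the flat big-endian OR assembly.
--     words = [block[i][j] for i in range(4) for j in range(4)]
--     width = 8
--     while len(words) > 1:
--         words = [(words[k] << width) | words[k + 1] for k in range(0, len(words), 2)]
--         width *= 2
--     return words[0]
-- ===== Notes on version B (the rewrite author's own statement) =====
-- stated objective: alternative
-- what changed: Replaces A's single positional pass (computing byte_index/shift_amount for each of the 16 bytes) with a logarithmic pairwise tree reduction: flatten, then repeatedly merge adjacent pairs with (hi << width) | lo while doubling the width (16 bytes -> 8 -> 4 -> 2 -> 1), correct because << distributes over | and | is associative.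
import Mathlib
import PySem

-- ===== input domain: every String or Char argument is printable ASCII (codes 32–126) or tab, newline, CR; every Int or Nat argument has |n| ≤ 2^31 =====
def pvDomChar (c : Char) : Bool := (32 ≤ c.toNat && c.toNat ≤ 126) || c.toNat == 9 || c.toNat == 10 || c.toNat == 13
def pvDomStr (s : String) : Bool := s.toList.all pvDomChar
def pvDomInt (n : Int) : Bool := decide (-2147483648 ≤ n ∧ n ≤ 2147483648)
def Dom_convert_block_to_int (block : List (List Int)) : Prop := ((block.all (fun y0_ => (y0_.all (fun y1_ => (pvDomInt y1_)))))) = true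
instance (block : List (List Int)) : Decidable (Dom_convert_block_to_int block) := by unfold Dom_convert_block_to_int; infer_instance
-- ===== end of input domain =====

-- B replaces A's single positional pass (byte_index/shift_amount per byte) with a pairwise
-- tree reduction (merge adjacent pairs with (hi << width) | lo, doubling width each pass);
-- objective is an alternative algorithm of the same cost, not speed.

-- ===== PORT A =====
def convert_block_to_int (block : List (List Int)) : Int :=
  let total_bytes : Int := 16
  (PySem.List.pyRange 0 4 1).foldl (fun output_int i =>
    (PySem.List.pyRange 0 4 1).foldl (fun output_int j =>
      let byte := PySem.List.pyGetD (PySem.List.pyGetD block i []) j 0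
      let byte_index := total_bytes - 1 - (i * 4 + j)
      let shift_amount := byte_index * 8
      -- shift_amount is 8*(0..15), never negative, so .toNat is exact (Python raises on a
      -- negative shift count, which never occurs here)
      PySem.Int.bor output_int (byte <<< shift_amount.toNat)) output_int) 0

-- ===== PORT B =====
-- one merging pass: [(words[k] << width) | words[k+1] for k in range(0, len(words), 2)];
-- exact for even-length lists (the only lengths reached: 16, 8, 4, 2); on an odd leftover
-- Python raises IndexError, which never occurs inside Pre_.
def pvPairPass (width : Nat) : List Int → List Int
  | x :: y :: rest => PySem.Int.bor (x <<< width) y :: pvPairPass width rest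
  | _ => []

theorem pvPairPass_len : ∀ (l : List Int) (width : Nat), 2 * (pvPairPass width l).length ≤ l.length
  | [], _ => by simp [pvPairPass]
  | [_], _ => by simp [pvPairPass]
  | _ :: _ :: rest, w => by
    simp only [pvPairPass, List.length_cons]
    have := pvPairPass_len rest w
    omega

-- the while loop: merge pairs until one word is left
def pvTreeLoop (width : Nat) (words : List Int) : Int :=
  if h : 1 < words.length then pvTreeLoop (width * 2) (pvPairPass width words)
  else words.headD 0   -- words[0]; words is empty only outside Pre_
termination_by words.length
decreasing_by
  have := pvPairPass_len words width
  omega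

def convert_block_to_int_alt (block : List (List Int)) : Int :=
  let words := (PySem.List.pyRange 0 4 1).flatMap (fun i =>
    (PySem.List.pyRange 0 4 1).map (fun j =>
      PySem.List.pyGetD (PySem.List.pyGetD block i []) j 0))
  pvTreeLoop 8 words

-- ===== PRECONDITION & SPEC =====
-- Pre_ is exactly the inputs on which A returns: A raises IndexError unless the block has at
-- least 4 rows and each of the first 4 rows has at least 4 entries.
def Pre_convert_block_to_int (block : List (List Int)) : Prop :=
  4 ≤ block.length ∧ ∀ row ∈ block.take 4, 4 ≤ row.length
instance (block : List (List Int)) : Decidable (Pre_convert_block_to_int block) := by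
  unfold Pre_convert_block_to_int; infer_instance

def pvWitness_convert_block_to_int : List (List Int) :=
  [[0, 1, 2, 3], [4, 5, 6, 7], [8, 9, 10, 11], [12, 13, 14, 15]]

def Spec_convert_block_to_int (block : List (List Int)) (out : Int) : Prop := out = convert_block_to_int_alt block
instance (block : List (List Int)) (out : Int) : Decidable (Spec_convert_block_to_int block out) := by unfold Spec_convert_block_to_int; infer_instance

-- ===== CLAIM (what is proved, stated in full; the proofs are below) =====
def Claim_equal_convert_block_to_int : Prop := ∀ (block : List (List Int)), Dom_convert_block_to_int block → Pre_convert_block_to_int block → Spec_convert_block_to_int block (convert_block_to_int block)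

-- ===== LEMMAS AND PROOFS =====

-- `ldiff` as a subtraction, bridging PySem's bor normal form to Nat.ldiff
theorem pvLdiffSub (b a : Nat) : b - (b &&& a) = Nat.ldiff b a := by
  induction b using Nat.binaryRec generalizing a with
  | zero => simp [Nat.ldiff]
  | bit bb b ih =>
    rw [← Nat.bit_testBit_zero_shiftRight_one a]
    rw [Nat.ldiff_bit, ← ih (a >>> 1)]
    have hland := Nat.land_bit bb b (a.testBit 0) (a >>> 1)
    have hle : b &&& (a >>> 1) ≤ b := Nat.and_le_left
    simp only [Nat.bit_val] at hland ⊢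
    rw [hland]
    cases bb <;> cases a.testBit 0 <;> simp <;> omega

-- Python's | computes bitwise or (infinite two's complement), bit by bit
theorem pvTestBit_bor (a b : Int) (k : Nat) :
    (PySem.Int.bor a b).testBit k = (a.testBit k || b.testBit k) := by
  have hns : ∀ X : Nat, (-(X:Int) - 1) = Int.negSucc X := by
    intro X; rw [Int.negSucc_eq]; ring
  have hcast : ∀ n : Nat, ((n : Int)).testBit k = n.testBit k := fun _ => rfl
  have hnsT : ∀ X : Nat, (Int.negSucc X).testBit k = !(X.testBit k) := fun _ => rfl
  have hneg : ∀ x : Int, ¬ 0 ≤ x → x.testBit k = !((-x - 1).toNat.testBit k) := by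
    intro x hx
    have h1 : x = Int.negSucc (-x - 1).toNat := by
      rw [Int.negSucc_eq]
      have : ((-x - 1).toNat : Int) = -x - 1 := by omega
      omega
    conv_lhs => rw [h1]
    exact hnsT _
  unfold PySem.Int.bor
  by_cases ha : 0 ≤ a <;> by_cases hb : 0 ≤ b <;> simp only [ha, hb, if_pos, if_false]
  · have h1 : a = ((a.toNat : Nat) : Int) := by omega
    have h2 : b = ((b.toNat : Nat) : Int) := by omega
    conv_rhs => rw [h1, h2]
    rw [hcast, hcast, hcast, Nat.testBit_lor]
  · rw [pvLdiffSub, hns, hnsT, Nat.testBit_ldiff, hneg b hb]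
    have h1 : a = ((a.toNat : Nat) : Int) := by omega
    conv_rhs => rw [h1, hcast]
    cases a.toNat.testBit k <;> cases (-b - 1).toNat.testBit k <;> rfl
  · rw [pvLdiffSub, hns, hnsT, Nat.testBit_ldiff, hneg a ha]
    have h2 : b = ((b.toNat : Nat) : Int) := by omega
    conv_rhs => rw [h2, hcast]
    cases b.toNat.testBit k <;> cases (-a - 1).toNat.testBit k <;> rfl
  · rw [hns, hnsT, Nat.testBit_land, hneg a ha, hneg b hb]
    cases (-a - 1).toNat.testBit k <;> cases (-b - 1).toNat.testBit k <;> rfl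

-- integers agreeing on every two's-complement bit are equal
theorem pvIntExt (a b : Int) (h : ∀ k, a.testBit k = b.testBit k) : a = b := by
  cases a with
  | ofNat m => cases b with
    | ofNat n => exact congrArg Int.ofNat (Nat.eq_of_testBit_eq fun i => h i)
    | negSucc n =>
      exfalso
      have hk := h (m + n + 1)
      have hm : m.testBit (m + n + 1) = false := Nat.testBit_eq_false_of_lt (by
        calc m < 2 ^ m := Nat.lt_two_pow_self
        _ ≤ 2 ^ (m + n + 1) := Nat.pow_le_pow_right (by norm_num) (by omega))
      have hn : n.testBit (m + n + 1) = false := Nat.testBit_eq_false_of_lt (by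
        calc n < 2 ^ n := Nat.lt_two_pow_self
        _ ≤ 2 ^ (m + n + 1) := Nat.pow_le_pow_right (by norm_num) (by omega))
      have hx : m.testBit (m + n + 1) = !(n.testBit (m + n + 1)) := hk
      rw [hm, hn] at hx
      exact Bool.false_ne_true hx
  | negSucc m => cases b with
    | ofNat n =>
      exfalso
      have hk := h (m + n + 1)
      have hm : m.testBit (m + n + 1) = false := Nat.testBit_eq_false_of_lt (by
        calc m < 2 ^ m := Nat.lt_two_pow_self
        _ ≤ 2 ^ (m + n + 1) := Nat.pow_le_pow_right (by norm_num) (by omega))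
      have hn : n.testBit (m + n + 1) = false := Nat.testBit_eq_false_of_lt (by
        calc n < 2 ^ n := Nat.lt_two_pow_self
        _ ≤ 2 ^ (m + n + 1) := Nat.pow_le_pow_right (by norm_num) (by omega))
      have hx : (!(m.testBit (m + n + 1))) = n.testBit (m + n + 1) := hk
      rw [hm, hn] at hx
      exact Bool.false_ne_true hx.symm
    | negSucc n =>
      have hx : m = n := Nat.eq_of_testBit_eq fun i => Bool.not_inj (h i)
      rw [hx]

theorem pvBorAssoc (a b c : Int) :
    PySem.Int.bor (PySem.Int.bor a b) c = PySem.Int.bor a (PySem.Int.bor b c) := by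
  apply pvIntExt
  intro k
  simp [pvTestBit_bor, Bool.or_assoc]

theorem pvBorZeroLeft (a : Int) : PySem.Int.bor 0 a = a := by
  rw [PySem.Int.bor_comm]; simp

-- doubling both operands doubles the Python OR (infinite two's complement)
theorem pvBorDouble (a b : Int) : PySem.Int.bor (2 * a) (2 * b) = 2 * PySem.Int.bor a b := by
  have hlor : ∀ m n : Nat, (2 * m) ||| (2 * n) = 2 * (m ||| n) := by
    intro m n
    have := Nat.lor_bit false m false n
    simp [Nat.bit_val] at this
    omega
  have hland1 : ∀ m n : Nat, (2 * m + 1) &&& (2 * n) = 2 * (m &&& n) := by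
    intro m n
    have := Nat.land_bit true m false n
    simp [Nat.bit_val] at this
    omega
  have hland2 : ∀ m n : Nat, (2 * m + 1) &&& (2 * n + 1) = 2 * (m &&& n) + 1 := by
    intro m n
    have := Nat.land_bit true m true n
    simp [Nat.bit_val] at this
    omega
  unfold PySem.Int.bor
  by_cases ha : 0 ≤ a <;> by_cases hb : 0 ≤ b
  · rw [if_pos (by omega), if_pos (by omega), if_pos ha, if_pos hb]
    have h2a : (2 * a).toNat = 2 * a.toNat := by omega
    have h2b : (2 * b).toNat = 2 * b.toNat := by omega
    rw [h2a, h2b, hlor]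
    push_cast
    ring
  · rw [if_pos (by omega), if_neg (by omega), if_pos ha, if_neg (by omega)]
    have h2b : (-(2 * b) - 1).toNat = 2 * (-b - 1).toNat + 1 := by omega
    have h2a : (2 * a).toNat = 2 * a.toNat := by omega
    rw [h2b, h2a, hland1]
    have hle : (-b - 1).toNat &&& a.toNat ≤ (-b - 1).toNat := Nat.and_le_left
    omega
  · rw [if_neg (by omega), if_pos (by omega), if_neg (by omega), if_pos hb]
    have h2a : (-(2 * a) - 1).toNat = 2 * (-a - 1).toNat + 1 := by omega
    have h2b : (2 * b).toNat = 2 * b.toNat := by omega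
    rw [h2a, h2b, hland1]
    have hle : (-a - 1).toNat &&& b.toNat ≤ (-a - 1).toNat := Nat.and_le_left
    omega
  · rw [if_neg (by omega), if_neg (by omega), if_neg (by omega), if_neg (by omega)]
    have h2a : (-(2 * a) - 1).toNat = 2 * (-a - 1).toNat + 1 := by omega
    have h2b : (-(2 * b) - 1).toNat = 2 * (-b - 1).toNat + 1 := by omega
    rw [h2a, h2b, hland2]
    omega

-- shifting left distributes over the Python OR
theorem pvBorShift (a b : Int) (k : Nat) :
    PySem.Int.bor a b <<< k = PySem.Int.bor (a <<< k) (b <<< k) := by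
  induction k generalizing a b with
  | zero => simp [Int.shiftLeft_eq]
  | succ k ih =>
    have ha : a <<< (k + 1) = (2 * a) <<< k := by
      rw [Int.shiftLeft_eq, Int.shiftLeft_eq, pow_succ]; ring
    have hb : b <<< (k + 1) = (2 * b) <<< k := by
      rw [Int.shiftLeft_eq, Int.shiftLeft_eq, pow_succ]; ring
    have hc : PySem.Int.bor a b <<< (k + 1) = (2 * PySem.Int.bor a b) <<< k := by
      rw [Int.shiftLeft_eq, Int.shiftLeft_eq, pow_succ]; ring
    rw [ha, hb, hc, ← ih, pvBorDouble]

-- composing shifts adds the shift amounts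
theorem pvShiftShift (x : Int) (m n : Nat) : (x <<< m) <<< n = x <<< (m + n) := by
  rw [Int.shiftLeft_eq, Int.shiftLeft_eq, Int.shiftLeft_eq, pow_add]; ring

theorem pvShiftZero (x : Int) : x <<< (0 : Nat) = x := by
  simp [Int.shiftLeft_eq]

-- unfolding equations for the while loop
theorem pvTreeLoop_step (w : Nat) (words : List Int) (h : 1 < words.length) :
    pvTreeLoop w words = pvTreeLoop (w * 2) (pvPairPass w words) := by
  rw [pvTreeLoop]
  simp [h]

theorem pvTreeLoop_one (w : Nat) (x : Int) : pvTreeLoop w [x] = x := by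
  rw [pvTreeLoop]
  simp

-- ===== VERDICT (by name: the statement is the Claim_ definition above) =====
set_option maxHeartbeats 2000000 in
theorem convert_block_to_int_spec : Claim_equal_convert_block_to_int := by
  intro block _ hpre
  obtain ⟨hlen, hrows⟩ := hpre
  rcases block with _ | ⟨r0, _ | ⟨r1, _ | ⟨r2, _ | ⟨r3, rest⟩⟩⟩⟩ <;>
    simp only [List.length_nil, List.length_cons] at hlen <;> try omega
  have h0 := hrows r0 (by simp)
  have h1 := hrows r1 (by simp)
  have h2 := hrows r2 (by simp)
  have h3 := hrows r3 (by simp)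
  rcases r0 with _ | ⟨a0, _ | ⟨a1, _ | ⟨a2, _ | ⟨a3, t0⟩⟩⟩⟩ <;>
    simp only [List.length_nil, List.length_cons] at h0 <;> try omega
  rcases r1 with _ | ⟨b0, _ | ⟨b1, _ | ⟨b2, _ | ⟨b3, t1⟩⟩⟩⟩ <;>
    simp only [List.length_nil, List.length_cons] at h1 <;> try omega
  rcases r2 with _ | ⟨c0, _ | ⟨c1, _ | ⟨c2, _ | ⟨c3, t2⟩⟩⟩⟩ <;>
    simp only [List.length_nil, List.length_cons] at h2 <;> try omega
  rcases r3 with _ | ⟨d0, _ | ⟨d1, _ | ⟨d2, _ | ⟨d3, t3⟩⟩⟩⟩ <;>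
    simp only [List.length_nil, List.length_cons] at h3 <;> try omega
  show convert_block_to_int _ = convert_block_to_int_alt _
  have g0 : ∀ {α : Type} (x0 x1 x2 x3 : α) (t : List α) (d : α),
      PySem.List.pyGetD (x0 :: x1 :: x2 :: x3 :: t) (0 : Int) d = x0 := by
    intro α x0 x1 x2 x3 t d; rw [PySem.List.pyGetD_ofNat']; rfl
  have g1 : ∀ {α : Type} (x0 x1 x2 x3 : α) (t : List α) (d : α),
      PySem.List.pyGetD (x0 :: x1 :: x2 :: x3 :: t) (1 : Int) d = x1 := by
    intro α x0 x1 x2 x3 t d; rw [PySem.List.pyGetD_ofNat']; rfl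
  have g2 : ∀ {α : Type} (x0 x1 x2 x3 : α) (t : List α) (d : α),
      PySem.List.pyGetD (x0 :: x1 :: x2 :: x3 :: t) (2 : Int) d = x2 := by
    intro α x0 x1 x2 x3 t d; rw [PySem.List.pyGetD_ofNat']; rfl
  have g3 : ∀ {α : Type} (x0 x1 x2 x3 : α) (t : List α) (d : α),
      PySem.List.pyGetD (x0 :: x1 :: x2 :: x3 :: t) (3 : Int) d = x3 := by
    intro α x0 x1 x2 x3 t d; rw [PySem.List.pyGetD_ofNat']; rfl
  have hrange : PySem.List.pyRange 0 4 1 = [0, 1, 2, 3] := by decide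
  simp only [convert_block_to_int, convert_block_to_int_alt, hrange, List.foldl_cons,
    List.foldl_nil, g0, g1, g2, g3, List.flatMap_cons, List.flatMap_nil, List.map_cons, List.map_nil,
    List.cons_append, List.nil_append, List.append_nil]
  norm_num
  rw [pvTreeLoop_step _ _ (by norm_num)]
  simp only [pvPairPass]
  rw [pvTreeLoop_step _ _ (by norm_num)]
  simp only [pvPairPass]
  rw [pvTreeLoop_step _ _ (by norm_num)]
  simp only [pvPairPass]
  rw [pvTreeLoop_step _ _ (by norm_num)]
  simp only [pvPairPass]
  rw [pvTreeLoop_one]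
  norm_num [pvBorShift, pvShiftShift, pvBorAssoc, pvBorZeroLeft, pvShiftZero]
  norm_num [Int.toNat]
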